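-- pv_equiv track=rewrite | github.com/sanjeed5/awesome-cursor-rules-mdc | cursor-rules-cli/src/main.py | group_rules_by_category
-- ===== SOURCE A (Python) =====
-- from typing import Dict, Any, List
--
-- def group_rules_by_category(rules: List[Dict[str, Any]]) -> Dict[str, List[Dict[str, Any]]]:
--     """
--     Group rules by their category.
--
--     Args:
--         rules: List of rule dictionaries with category information
--
--     Returns:
--         Dictionary mapping categories to lists of rules
--     """
--     categories = {}
--
--     for rule in rules:
--         category = rule.get("category", "other")
--         if category not in categories:
--             categories[category] = []
--         categories[category].append(rule)
--
--     return categories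
-- ===== SOURCE B (Python) =====
-- def group_rules_by_category(rules):
--     """Two-pass grouping: ordered distinct categories, then filter per category."""
--     def key(r):
--         return r.get("category", "other")
--     cats = dict.fromkeys(key(r) for r in rules)
--     return {c: [r for r in rules if key(r) == c] for c in cats}
-- ===== Notes on version B (the rewrite author's own statement) =====
-- stated objective: alternative
-- what changed: Replaces the single-pass mutable-bucket accumulation with a two-pass scheme: first collect the distinct categories in first-occurrence order, then build each group by filtering the input, with no mutable dict of buckets.
import Mathlib
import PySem

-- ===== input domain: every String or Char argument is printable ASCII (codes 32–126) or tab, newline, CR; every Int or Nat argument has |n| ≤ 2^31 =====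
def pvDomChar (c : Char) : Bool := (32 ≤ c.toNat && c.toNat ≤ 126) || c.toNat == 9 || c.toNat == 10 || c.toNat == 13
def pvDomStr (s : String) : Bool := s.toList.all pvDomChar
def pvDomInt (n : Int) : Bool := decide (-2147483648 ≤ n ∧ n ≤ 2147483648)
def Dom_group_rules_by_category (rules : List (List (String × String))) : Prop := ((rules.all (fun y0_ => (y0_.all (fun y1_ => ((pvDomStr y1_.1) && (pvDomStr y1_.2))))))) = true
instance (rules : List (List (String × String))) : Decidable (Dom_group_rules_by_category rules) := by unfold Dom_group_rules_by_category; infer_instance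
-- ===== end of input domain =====

-- B groups by first collecting the distinct categories in order and filtering per category
-- (alternative two-pass decomposition, no mutable bucket dict); return values proved equal.


-- ===== PORT A =====
def group_rules_by_category (rules : List (List (String × String))) : List (String × List (List (String × String))) :=
  (rules.foldl (fun categories rule =>
      let category := (PySem.Dict.mk rule).getD "category" "other"
      let categories :=
        if categories.contains category then categories
        else categories.insert category ([] : List (List (String × String)))
      categories.modify category [] (fun l => l ++ [rule]))
    PySem.Dict.empty).items

-- ===== PORT B =====
-- B's key function
def pvKey (r : List (String × String)) : String := (PySem.Dict.mk r).getD "category" "other"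

def group_rules_by_category_alt (rules : List (List (String × String))) : List (String × List (List (String × String))) :=
  let cats := PySem.List.dedup (rules.map pvKey)
  cats.map (fun c => (c, rules.filter (fun r => pvKey r == c)))

-- ===== PRECONDITION & SPEC =====
def Spec_group_rules_by_category (rules : List (List (String × String))) (out : List (String × List (List (String × String)))) : Prop := out = group_rules_by_category_alt rules
instance (rules : List (List (String × String))) (out : List (String × List (List (String × String)))) : Decidable (Spec_group_rules_by_category rules out) := by unfold Spec_group_rules_by_category; infer_instance

-- ===== CLAIM (what is proved, stated in full; the proofs are below) =====
def Claim_equal_group_rules_by_category : Prop := ∀ (rules : List (List (String × String))), Dom_group_rules_by_category rules → Spec_group_rules_by_category rules (group_rules_by_category rules)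

-- ===== LEMMAS AND PROOFS =====

-- B's value on a processed prefix, as a list of (category, group) pairs
def pvGroups (p : List (List (String × String))) : List (String × List (List (String × String))) :=
  (PySem.Set.ofList (p.map pvKey)).map (fun c => (c, p.filter (fun r => pvKey r == c)))

-- A's loop body
def pvStep (categories : PySem.Dict String (List (List (String × String))))
    (rule : List (String × String)) : PySem.Dict String (List (List (String × String))) :=
  let category := (PySem.Dict.mk rule).getD "category" "other"
  let categories :=
    if categories.contains category then categories
    else categories.insert category ([] : List (List (String × String)))
  categories.modify category [] (fun l => l ++ [rule])

lemma find?_beq_of_mem {c : String} {l : List String} (h : c ∈ l) :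
    l.find? (fun c' => c' == c) = some c := by
  induction l with
  | nil => cases h
  | cons a t ih =>
    by_cases hac : a = c
    · simp [List.find?, hac]
    · have hm : c ∈ t := by
        rcases List.mem_cons.mp h with h1 | h1
        · exact absurd h1.symm hac
        · exact h1
      have hb : (a == c) = false := by simp [hac]
      simp [List.find?, hb, ih hm]

lemma contains_groups (p : List (List (String × String))) (c : String) :
    (PySem.Dict.mk (pvGroups p)).contains c = decide (c ∈ p.map pvKey) := by
  rw [Bool.eq_iff_iff]
  simp only [PySem.Dict.contains, pvGroups]
  simp [List.any_map, Function.comp_def, PySem.Set.mem_ofList]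

lemma getD_groups {p : List (List (String × String))} {c : String}
    (h : c ∈ p.map pvKey) :
    (PySem.Dict.mk (pvGroups p)).getD c [] = p.filter (fun r => pvKey r == c) := by
  have hmem : c ∈ PySem.Set.ofList (p.map pvKey) := (PySem.Set.mem_ofList _ _).mpr h
  simp [PySem.Dict.getD, PySem.Dict.get?, pvGroups, List.find?_map, Function.comp_def,
    find?_beq_of_mem hmem]

lemma ofList_append_singleton {α : Type} [BEq α] (xs : List α) (x : α) :
    PySem.Set.ofList (xs ++ [x]) = PySem.Set.add (PySem.Set.ofList xs) x := by
  simp [PySem.Set.ofList, List.foldl_append]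

lemma pvStep_groups (p : List (List (String × String))) (r : List (String × String)) :
    pvStep (PySem.Dict.mk (pvGroups p)) r = PySem.Dict.mk (pvGroups (p ++ [r])) := by
  set c := pvKey r with hc
  have hcat : (PySem.Dict.mk r).getD "category" "other" = c := rfl
  have hK : List.map pvKey (p ++ [r]) = List.map pvKey p ++ [c] := by simp [hc]
  by_cases hmem : c ∈ p.map pvKey
  · -- existing category: in-place update of its bucket
    have hcont : (PySem.Dict.mk (pvGroups p)).contains c = true := by
      rw [contains_groups]; simp [hmem]
    have hS : PySem.Set.ofList (List.map pvKey (p ++ [r]))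
        = PySem.Set.ofList (List.map pvKey p) := by
      rw [hK, ofList_append_singleton]
      simp [PySem.Set.add, PySem.Set.mem_ofList, hmem]
    apply PySem.Dict.ext
    rw [pvStep]
    simp only [hcat, hcont, if_pos]
    rw [PySem.Dict.modify, PySem.Dict.insert, if_pos hcont, getD_groups hmem]
    show List.map _ (pvGroups p) = pvGroups (p ++ [r])
    rw [show pvGroups (p ++ [r])
        = (PySem.Set.ofList (List.map pvKey p)).map
            (fun c' => (c', (p ++ [r]).filter (fun r' => pvKey r' == c'))) by
      rw [pvGroups, hS]]
    rw [pvGroups, List.map_map]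
    apply List.map_congr_left
    intro c' _
    simp only [Function.comp_def, List.filter_append]
    by_cases hcc : c' = c
    · subst hcc
      simp [List.filter, hc]
    · have h1 : (c' == c) = false := by simp [hcc]
      have h2 : (pvKey r == c') = false := by
        rw [← hc]; simp; exact fun h => (hcc h.symm).elim
      simp [h1, List.filter, h2]
  · -- new category: appended at the end with its singleton bucket
    have hcont : (PySem.Dict.mk (pvGroups p)).contains c = false := by
      rw [contains_groups]; simp [hmem]
    have hS : PySem.Set.ofList (List.map pvKey (p ++ [r]))
        = PySem.Set.ofList (List.map pvKey p) ++ [c] := by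
      rw [hK, ofList_append_singleton]
      simp only [PySem.Set.add]
      rw [if_neg]
      simp only [PySem.Set.contains_iff, PySem.Set.mem_ofList]
      exact hmem
    apply PySem.Dict.ext
    rw [pvStep]
    simp only [hcat, hcont, Bool.false_eq_true, if_false]
    have hins : ((PySem.Dict.mk (pvGroups p)).insert c ([] : List (List (String × String)))).items
        = pvGroups p ++ [(c, [])] :=
      PySem.Dict.items_insert_of_not_contains _ _ hcont
    have hcont2 : ((PySem.Dict.mk (pvGroups p)).insert c ([] : List (List (String × String)))).contains c = true :=
      PySem.Dict.contains_insert_self _ _ _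
    have hget2 : ((PySem.Dict.mk (pvGroups p)).insert c ([] : List (List (String × String)))).getD c []
        = ([] : List (List (String × String))) :=
      PySem.Dict.getD_insert_self _ c [] []
    rw [PySem.Dict.modify, PySem.Dict.insert, if_pos hcont2, hget2]
    show List.map _ ((PySem.Dict.mk (pvGroups p)).insert c ([] : List (List (String × String)))).items
        = pvGroups (p ++ [r])
    rw [hins, List.map_append]
    rw [show pvGroups (p ++ [r])
        = (PySem.Set.ofList (List.map pvKey p)).map
              (fun c' => (c', (p ++ [r]).filter (fun r' => pvKey r' == c')))
          ++ [(c, (p ++ [r]).filter (fun r' => pvKey r' == c))] by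
      rw [pvGroups, hS, List.map_append]; rfl]
    have hflt : p.filter (fun r' => pvKey r' == c) = [] := by
      apply List.filter_eq_nil_iff.mpr
      intro r' hr' h
      exact hmem (List.mem_map.mpr ⟨r', hr', by simpa using h⟩)
    congr 1
    · rw [pvGroups, List.map_map]
      apply List.map_congr_left
      intro c' hc'
      have hne : c' ≠ c := by
        intro h; exact hmem (h ▸ (PySem.Set.mem_ofList _ _).mp hc')
      simp only [Function.comp_def, List.filter_append]
      have h1 : (c' == c) = false := by simp [hne]
      have h2 : (pvKey r == c') = false := by
        rw [← hc]; simp; exact fun h => (hne h.symm).elim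
      simp [h1, List.filter, h2]
    · simp only [List.filter_append, hflt, List.nil_append]
      simp [List.filter, hc]

lemma foldl_pvStep (rs p : List (List (String × String))) :
    rs.foldl pvStep (PySem.Dict.mk (pvGroups p)) = PySem.Dict.mk (pvGroups (p ++ rs)) := by
  induction rs generalizing p with
  | nil => simp
  | cons r t ih =>
    rw [List.foldl_cons, pvStep_groups, ih]
    have : p ++ [r] ++ t = p ++ r :: t := by simp
    rw [this]

-- ===== VERDICT (by name: the statement is the Claim_ definition above) =====
theorem group_rules_by_category_spec : Claim_equal_group_rules_by_category := by
  intro rules _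
  show group_rules_by_category rules = group_rules_by_category_alt rules
  have h0 : PySem.Dict.empty = PySem.Dict.mk (pvGroups []) := rfl
  have h : rules.foldl pvStep PySem.Dict.empty = PySem.Dict.mk (pvGroups rules) := by
    rw [h0, foldl_pvStep]; simp
  show (rules.foldl pvStep PySem.Dict.empty).items = _
  rw [h]
  rfl
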